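-- pv_equiv track=rewrite | github.com/artoftheblue/hse-homeworks | python/contest-4/a.py | square_fibonacci
-- ===== SOURCE A (Python) =====
-- def square_fibonacci(number):
--     yield 1
--     if number > 1:
--         yield 1
--     number1, number2 = 1, 1
--     counter = 2
--     while counter < number:
--         number1, number2 = number2, number1 + number2
--         yield number2 ** 2
--         counter += 1
-- ===== SOURCE B (Python) =====
-- def square_fibonacci(number):
--     # Generates squares of Fibonacci numbers directly via the squares-only
--     # recurrence s_n = 2*s_{n-1} + 2*s_{n-2} - s_{n-3}; no Fibonacci numbers kept.
--     count = number if number > 1 else 1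
--     yield 1
--     if count >= 2:
--         yield 1
--     if count >= 3:
--         yield 4
--     s1, s2, s3 = 1, 1, 4
--     for _ in range(count - 3):
--         s1, s2, s3 = s2, s3, 2 * s3 + 2 * s2 - s1
--         yield s3
-- ===== Notes on version B (the rewrite author's own statement) =====
-- stated objective: alternative
-- what changed: B generates Fibonacci squares directly from the three-term recurrence on the squares themselves (s_n = 2*s_{n-1} + 2*s_{n-2} - s_{n-3}), maintaining the last three squares, instead of maintaining the Fibonacci pair and squaring each term.
import Mathlib
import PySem

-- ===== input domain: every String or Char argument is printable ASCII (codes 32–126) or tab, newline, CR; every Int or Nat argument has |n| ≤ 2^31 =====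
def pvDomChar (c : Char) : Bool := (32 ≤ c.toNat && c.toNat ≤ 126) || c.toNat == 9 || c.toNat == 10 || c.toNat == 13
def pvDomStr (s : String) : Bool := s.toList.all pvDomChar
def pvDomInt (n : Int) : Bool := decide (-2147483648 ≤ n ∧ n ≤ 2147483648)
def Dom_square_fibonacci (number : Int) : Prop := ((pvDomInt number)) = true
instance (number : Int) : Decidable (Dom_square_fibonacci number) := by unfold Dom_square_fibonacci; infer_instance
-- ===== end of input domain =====

-- B yields the same sequence but via the squares-only recurrence s_n = 2*s_{n-1} + 2*s_{n-2} - s_{n-3}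
-- (an alternative decomposition, not faster). Both Pythons are generators; the values compared are their full yields.

-- ===== PORT A =====
-- while counter < number: (number1, number2) := (number2, number1+number2); yield number2**2
def pvALoop : Nat → Int → Int → List Int
  | 0, _, _ => []
  | k + 1, n1, n2 => (n1 + n2) ^ 2 :: pvALoop k n2 (n1 + n2)

def square_fibonacci (number : Int) : List Int :=
  (1 :: (if number > 1 then [1] else [])) ++ pvALoop (number - 2).toNat 1 1

-- ===== PORT B =====
-- for _ in range(count-3): (s1,s2,s3) := (s2,s3, 2*s3+2*s2-s1); yield s3
def pvBLoop : Nat → Int → Int → Int → List Int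
  | 0, _, _, _ => []
  | k + 1, s1, s2, s3 => (2 * s3 + 2 * s2 - s1) :: pvBLoop k s2 s3 (2 * s3 + 2 * s2 - s1)

def square_fibonacci_alt (number : Int) : List Int :=
  let count : Int := if number > 1 then number else 1
  (1 :: (if count ≥ 2 then [1] else []) ++ (if count ≥ 3 then [4] else []))
    ++ pvBLoop (count - 3).toNat 1 1 4

-- ===== PRECONDITION & SPEC =====
def Spec_square_fibonacci (number : Int) (out : List Int) : Prop := out = square_fibonacci_alt number
instance (number : Int) (out : List Int) : Decidable (Spec_square_fibonacci number out) := by unfold Spec_square_fibonacci; infer_instance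

-- ===== CLAIM (what is proved, stated in full; the proofs are below) =====
def Claim_equal_square_fibonacci : Prop := ∀ (number : Int), Dom_square_fibonacci number → Spec_square_fibonacci number (square_fibonacci number)

-- ===== LEMMAS AND PROOFS =====

-- A's Fibonacci-pair loop equals B's squares-only loop when seeded consistently:
-- for any consecutive pair (b, a+b), the squared yields satisfy the three-square recurrence.
theorem pvALoop_eq_pvBLoop (k : Nat) : ∀ (a b : Int),
    pvALoop k b (a + b) = pvBLoop k (a ^ 2) (b ^ 2) ((a + b) ^ 2) := by
  induction k with
  | zero => intro a b; rfl
  | succ k ih =>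
    intro a b
    show (b + (a + b)) ^ 2 :: pvALoop k (a + b) (b + (a + b))
        = (2 * (a + b) ^ 2 + 2 * b ^ 2 - a ^ 2)
            :: pvBLoop k (b ^ 2) ((a + b) ^ 2) (2 * (a + b) ^ 2 + 2 * b ^ 2 - a ^ 2)
    have hhead : (b + (a + b)) ^ 2 = 2 * (a + b) ^ 2 + 2 * b ^ 2 - a ^ 2 := by ring
    have htail := ih b (a + b)
    rw [hhead] at htail ⊢
    rw [htail]

theorem square_fibonacci_eq (number : Int) :
    square_fibonacci number = square_fibonacci_alt number := by
  unfold square_fibonacci square_fibonacci_alt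
  by_cases h1 : number > 1
  · by_cases h3 : number ≥ 3
    · -- (number-2).toNat = (number-3).toNat + 1, and the first B-loop step yields 4
      have hn2 : (number - 2).toNat = (number - 3).toNat + 1 := by omega
      have hkey : pvALoop ((number - 3).toNat + 1) 1 1
          = 4 :: pvBLoop (number - 3).toNat 1 1 4 := by
        have := pvALoop_eq_pvBLoop ((number - 3).toNat + 1) 0 1
        norm_num at this
        rw [this]; rfl
      have c2 : (2:Int) ≤ number := by omega
      have c3 : (3:Int) ≤ number := by omega
      simp only [if_pos h1, ge_iff_le, if_pos c2, if_pos c3, hn2, hkey]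
      rfl
    · -- number = 2: both yield [1, 1]
      have h2 : number = 2 := by omega
      subst h2; rfl
  · -- number ≤ 1: count = 1, both yield [1]
    have hz : (number - 2).toNat = 0 := by omega
    simp [h1, hz, pvALoop, pvBLoop]

-- ===== VERDICT (by name: the statement is the Claim_ definition above) =====
theorem square_fibonacci_spec : Claim_equal_square_fibonacci := by
  intro number _
  exact square_fibonacci_eq number
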